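-- pv_equiv track=rewrite | github.com/jayasurya-n/Contests | GFG_Contest/Job-A_Thon-Challenge-21-01/q2.py | xorPair
-- ===== SOURCE A (Python) =====
-- from collections import deque, defaultdict
--
-- def xorPair(arr):
--     n = len(arr)
--     hash = defaultdict(int)
--     hash[0]=-1
--     def solve(ind,xor):
--         hash[xor]+=1
--         for i in range(ind,n):
--             xor^=arr[i]
--             solve(i+1,xor)
--             xor^=arr[i]
--     solve(0,0)
--     ans = 0
--     mod = 10**9+7
--     for val in hash.values():
--         ans = (ans+((val*(val-1))//2)%mod)%mod
--     return ans
-- ===== SOURCE B (Python) =====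
-- def xorPair(arr):
--     mod = 10**9 + 7
--     cnt = {0: 1}
--     for a in arr:
--         nxt = dict(cnt)
--         for k, v in cnt.items():
--             nxt[k ^ a] = nxt.get(k ^ a, 0) + v
--         cnt = nxt
--     cnt[0] -= 1
--     ans = 0
--     for v in cnt.values():
--         ans = (ans + (v * (v - 1) // 2) % mod) % mod
--     return ans
-- ===== Notes on version B (the rewrite author's own statement) =====
-- stated objective: faster
-- what changed: A enumerates all 2^n subsets by nested recursion, bumping a defaultdict per subset; B builds the same XOR-value->subset-count table iteratively with a dictionary DP (each element XOR-shifts and merges the table), then applies the same pair-count formula.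
import Mathlib
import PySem

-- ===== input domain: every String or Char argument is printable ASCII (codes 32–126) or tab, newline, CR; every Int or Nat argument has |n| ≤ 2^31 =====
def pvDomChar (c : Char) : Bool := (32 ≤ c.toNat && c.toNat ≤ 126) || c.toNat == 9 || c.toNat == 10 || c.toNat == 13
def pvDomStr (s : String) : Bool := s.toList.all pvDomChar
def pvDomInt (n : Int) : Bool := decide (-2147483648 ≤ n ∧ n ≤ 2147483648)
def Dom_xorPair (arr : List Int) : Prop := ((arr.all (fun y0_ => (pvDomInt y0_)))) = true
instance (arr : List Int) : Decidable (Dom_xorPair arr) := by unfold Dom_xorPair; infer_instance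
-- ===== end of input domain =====

-- B replaces A's Theta(2^n) recursion over all subsets by an iterative dict DP on XOR-value counts (O(n*d), d = distinct subset-XOR values); measured faster in a timing run; return values proved equal.

-- ===== PORT A =====
-- A's inner 'solve(ind, xor)' recursion, on the suffix arr[ind:] as a list; the
-- for-loop over i in range(ind, n) is pvLoopA.
mutual
def pvSolveA (l : List Int) (xr : Int) (h : PySem.Dict Int Int) : PySem.Dict Int Int :=
  pvLoopA l xr (h.modify xr 0 (· + 1))
termination_by (l.length, 1)

def pvLoopA (l : List Int) (xr : Int) (h : PySem.Dict Int Int) : PySem.Dict Int Int :=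
  match l with
  | [] => h
  | a :: rest => pvLoopA rest xr (pvSolveA rest (PySem.Int.bxor xr a) h)
termination_by (l.length, 0)
end

def xorPair (arr : List Int) : Int :=
  let hash := (PySem.Dict.empty : PySem.Dict Int Int).insert 0 (-1)
  let hash := pvSolveA arr 0 hash
  let md : Int := 10 ^ 9 + 7
  hash.values.foldl
    (fun ans val => PySem.Int.mod (ans + PySem.Int.mod (PySem.Int.floordiv (val * (val - 1)) 2) md) md) 0

-- ===== PORT B =====
-- one DP step: nxt = dict(cnt); for (k,v) in cnt.items(): nxt[k^a] = nxt.get(k^a,0)+v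
def pvStepB (c : PySem.Dict Int Int) (a : Int) : PySem.Dict Int Int :=
  c.items.foldl
    (fun d p => d.insert (PySem.Int.bxor p.1 a) (d.getD (PySem.Int.bxor p.1 a) 0 + p.2)) c

def xorPair_alt (arr : List Int) : Int :=
  let md : Int := 10 ^ 9 + 7
  let cnt := arr.foldl pvStepB ((PySem.Dict.empty : PySem.Dict Int Int).insert 0 1)
  let cnt := cnt.modify 0 0 (· - 1)
  cnt.values.foldl
    (fun ans v => PySem.Int.mod (ans + PySem.Int.mod (PySem.Int.floordiv (v * (v - 1)) 2) md) md) 0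

-- ===== PRECONDITION & SPEC =====
def Spec_xorPair (arr : List Int) (out : Int) : Prop := out = xorPair_alt arr
instance (arr : List Int) (out : Int) : Decidable (Spec_xorPair arr out) := by unfold Spec_xorPair; infer_instance

-- ===== CLAIM (what is proved, stated in full; the proofs are below) =====
def Claim_equal_xorPair : Prop := ∀ (arr : List Int), Dom_xorPair arr → Spec_xorPair arr (xorPair arr)

-- ===== LEMMAS AND PROOFS =====

-- XOR algebra: Python's ^ on Int (PySem.Int.bxor) via a (sign, magnitude-bits) encoding.
def pvEnc (a : Int) : Bool × Nat := if 0 ≤ a then (false, a.toNat) else (true, (-a - 1).toNat)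
def pvDec (p : Bool × Nat) : Int := if p.1 then -(p.2 : Int) - 1 else (p.2 : Int)

theorem pvEnc_dec (p : Bool × Nat) : pvEnc (pvDec p) = p := by
  rcases p with ⟨s, n⟩
  cases s <;> simp [pvEnc, pvDec] <;> omega

theorem bxor_dec (a b : Int) :
    PySem.Int.bxor a b = pvDec (Bool.xor (pvEnc a).1 (pvEnc b).1, (pvEnc a).2 ^^^ (pvEnc b).2) := by
  by_cases ha : 0 ≤ a <;> by_cases hb : 0 ≤ b <;>
    simp [PySem.Int.bxor, pvEnc, pvDec, ha, hb]

theorem bxor_assoc (a b c : Int) :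
    PySem.Int.bxor (PySem.Int.bxor a b) c = PySem.Int.bxor a (PySem.Int.bxor b c) := by
  rw [bxor_dec a b, bxor_dec b c, bxor_dec _ c, bxor_dec a, pvEnc_dec, pvEnc_dec]
  simp [Nat.xor_assoc]

theorem bxor_cancel (c x : Int) : PySem.Int.bxor c (PySem.Int.bxor c x) = x := by
  rw [← bxor_assoc, PySem.Int.bxor_self, PySem.Int.bxor_comm, PySem.Int.bxor_zero]

theorem zero_bxor (a : Int) : PySem.Int.bxor 0 a = a := by
  rw [PySem.Int.bxor_comm, PySem.Int.bxor_zero]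

theorem bxor_eq_zero_iff (a b : Int) : PySem.Int.bxor a b = 0 ↔ a = b := by
  constructor
  · intro h
    have := congrArg (PySem.Int.bxor a) h
    rwa [bxor_cancel, PySem.Int.bxor_zero, eq_comm] at this
  · rintro rfl; exact PySem.Int.bxor_self a

-- counting helper
theorem count_map_bxor (M : List Int) (c x : Int) :
    (M.map (fun y => PySem.Int.bxor c y)).count x = M.count (PySem.Int.bxor c x) := by
  have hinj : Function.Injective (fun y => PySem.Int.bxor c y) := by
    intro u v h
    have := congrArg (PySem.Int.bxor c) h
    simpa [bxor_cancel] using this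
  have := List.count_map_of_injective (x := PySem.Int.bxor c x) M (fun y => PySem.Int.bxor c y) hinj
  simpa [bxor_cancel] using this

theorem count_map_bxor_right (M : List Int) (a x : Int) :
    (M.map (fun y => PySem.Int.bxor y a)).count x = M.count (PySem.Int.bxor x a) := by
  have h1 : (M.map (fun y => PySem.Int.bxor y a)) = M.map (fun y => PySem.Int.bxor a y) := by
    simp [PySem.Int.bxor_comm]
  rw [h1, count_map_bxor, PySem.Int.bxor_comm]

-- F l x = number of sublists of l whose XOR is x (as an Int)
def pvXorF (s : List Int) : Int := s.foldl PySem.Int.bxor 0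
def pvF (l : List Int) (x : Int) : Int := ((l.sublists.map pvXorF).count x : Int)

theorem foldl_bxor_shift (s : List Int) : ∀ c, s.foldl PySem.Int.bxor c = PySem.Int.bxor c (s.foldl PySem.Int.bxor 0) := by
  induction s with
  | nil => intro c; simp [PySem.Int.bxor_zero]
  | cons b s ih =>
    intro c
    simp only [List.foldl_cons]
    rw [ih (PySem.Int.bxor c b), ih (PySem.Int.bxor 0 b), zero_bxor, bxor_assoc]

theorem pvXorF_cons (a : Int) (s : List Int) : pvXorF (a :: s) = PySem.Int.bxor a (pvXorF s) := by
  simp only [pvXorF, List.foldl_cons]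
  rw [foldl_bxor_shift, zero_bxor]

theorem pvXorF_concat (s : List Int) (a : Int) : pvXorF (s ++ [a]) = PySem.Int.bxor (pvXorF s) a := by
  simp [pvXorF]

theorem pvF_nil (x : Int) : pvF [] x = if x = 0 then 1 else 0 := by
  by_cases h : x = 0 <;> simp [pvF, pvXorF, List.count_singleton, h] <;> simp [Ne.symm h]

theorem pvF_nonneg (l : List Int) (x : Int) : 0 ≤ pvF l x := by
  simp [pvF]

theorem pvF_pos_zero (l : List Int) : 0 < pvF l 0 := by
  have h : (0 : Int) ∈ l.sublists.map pvXorF := by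
    refine List.mem_map.mpr ⟨[], ?_, rfl⟩
    exact List.mem_sublists.mpr (List.nil_sublist l)
  have := List.count_pos_iff.mpr h
  simp only [pvF]
  exact_mod_cast this

theorem bxor_right_eq_iff (x a y : Int) : PySem.Int.bxor x a = y ↔ x = PySem.Int.bxor a y := by
  constructor
  · rintro rfl
    rw [PySem.Int.bxor_comm x a, bxor_cancel]
  · rintro rfl
    rw [PySem.Int.bxor_comm (PySem.Int.bxor a y) a, bxor_cancel]

theorem count_pair_flatMap (a x : Int) (L : List (List Int)) :
    (L.flatMap (fun s => [pvXorF s, pvXorF (a :: s)])).count x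
      = (L.map pvXorF).count x + (L.map pvXorF).count (PySem.Int.bxor x a) := by
  induction L with
  | nil => simp
  | cons s L ih =>
    rw [List.flatMap_cons, List.count_append, ih, pvXorF_cons]
    have hiff : (pvXorF s = PySem.Int.bxor x a) ↔ (PySem.Int.bxor a (pvXorF s) = x) := by
      rw [eq_comm, bxor_right_eq_iff, eq_comm]
    have hbool : (pvXorF s == PySem.Int.bxor x a) = (PySem.Int.bxor a (pvXorF s) == x) := by
      rw [Bool.eq_iff_iff]
      simp only [beq_iff_eq]
      exact hiff
    have key : List.count x [pvXorF s, PySem.Int.bxor a (pvXorF s)]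
        = List.count x [pvXorF s] + List.count (PySem.Int.bxor x a) [pvXorF s] := by
      simp only [List.count_cons, List.count_nil, hbool]
      split_ifs <;> omega
    rw [key]
    simp only [List.map_cons, List.count_cons, List.count_nil, beq_iff_eq]
    split_ifs <;> omega

theorem pvF_cons (a : Int) (l : List Int) (x : Int) :
    pvF (a :: l) x = pvF l x + pvF l (PySem.Int.bxor x a) := by
  have h : (a :: l).sublists.map pvXorF = l.sublists.flatMap (fun s => [pvXorF s, pvXorF (a :: s)]) := by
    rw [List.sublists_cons]
    simp [List.map_flatMap]
  simp only [pvF, h, count_pair_flatMap]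
  push_cast; ring

theorem pvF_concat (l : List Int) (a : Int) (x : Int) :
    pvF (l ++ [a]) x = pvF l x + pvF l (PySem.Int.bxor x a) := by
  have h := List.sublists_concat l a
  simp only [pvF, h, List.map_append, List.count_append, List.map_map]
  have h2 : (List.map (pvXorF ∘ fun x => x ++ [a]) l.sublists)
      = (l.sublists.map pvXorF).map (fun y => PySem.Int.bxor y a) := by
    simp [Function.comp, pvXorF_concat]
  rw [h2, count_map_bxor_right]
  push_cast; ring

-- ===== A-side characterisation =====

theorem bxor_cancel_right (x a : Int) : PySem.Int.bxor (PySem.Int.bxor x a) a = x := by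
  rw [bxor_assoc, PySem.Int.bxor_self, PySem.Int.bxor_zero]

theorem bxor_swap (xr a x : Int) :
    PySem.Int.bxor (PySem.Int.bxor xr a) x = PySem.Int.bxor (PySem.Int.bxor xr x) a := by
  rw [bxor_assoc, PySem.Int.bxor_comm a x, ← bxor_assoc]

theorem loopA_getD (l : List Int) : ∀ xr (h : PySem.Dict Int Int) x, (pvLoopA l xr h).getD x 0
    = h.getD x 0 + (pvF l (PySem.Int.bxor xr x) - (if PySem.Int.bxor xr x = 0 then 1 else 0)) := by
  induction l with
  | nil =>
    intro xr h x
    simp only [pvLoopA, pvF_nil]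
    split_ifs <;> omega
  | cons a rest ih =>
    have hsolve : ∀ xr (h : PySem.Dict Int Int) x, (pvSolveA rest xr h).getD x 0
        = h.getD x 0 + pvF rest (PySem.Int.bxor xr x) := by
      intro xr h x
      simp only [pvSolveA]
      rw [ih, PySem.Dict.getD_modify]
      by_cases hx : x = xr
      · subst hx
        simp [PySem.Int.bxor_self]
      · have hz : ¬ PySem.Int.bxor xr x = 0 := fun hc => hx ((bxor_eq_zero_iff xr x).mp hc).symm
        simp [hx, hz]
    intro xr h x
    simp only [pvLoopA]
    rw [ih, hsolve, bxor_swap, pvF_cons]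
    ring

theorem solveA_getD (l : List Int) : ∀ xr (h : PySem.Dict Int Int) x, (pvSolveA l xr h).getD x 0
    = h.getD x 0 + pvF l (PySem.Int.bxor xr x) := by
  intro xr h x
  simp only [pvSolveA]
  rw [loopA_getD, PySem.Dict.getD_modify]
  by_cases hx : x = xr
  · subst hx
    simp [PySem.Int.bxor_self]
  · have hz : ¬ PySem.Int.bxor xr x = 0 := fun hc => hx ((bxor_eq_zero_iff xr x).mp hc).symm
    simp [hx, hz]

theorem or_pos_iff (k : Prop) (u v w : Int) (hu : 0 ≤ u) (hv : 0 ≤ v) (hw : w = u + v) :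
    ((k ∨ 0 < u) ∨ 0 < v) ↔ (k ∨ 0 < w) := by
  subst hw
  constructor
  · rintro ((hk | h1) | h2)
    · exact Or.inl hk
    · exact Or.inr (by omega)
    · exact Or.inr (by omega)
  · rintro (hk | h1)
    · exact Or.inl (Or.inl hk)
    · by_cases hb : 0 < u
      · exact Or.inl (Or.inr hb)
      · exact Or.inr (by omega)

theorem loopA_keys (l : List Int) : ∀ xr (h : PySem.Dict Int Int) x, x ∈ (pvLoopA l xr h).keys
    ↔ x ∈ h.keys ∨ 0 < pvF l (PySem.Int.bxor xr x) - (if PySem.Int.bxor xr x = 0 then 1 else 0) := by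
  induction l with
  | nil =>
    intro xr h x
    simp only [pvLoopA, pvF_nil]
    split_ifs <;> simp
  | cons a rest ih =>
    have hsolve : ∀ xr (h : PySem.Dict Int Int) x, x ∈ (pvSolveA rest xr h).keys
        ↔ x ∈ h.keys ∨ 0 < pvF rest (PySem.Int.bxor xr x) := by
      intro xr h x
      simp only [pvSolveA]
      rw [ih]
      rw [show (h.modify xr 0 (· + 1)).keys = (h.insert xr (h.getD xr 0 + 1)).keys from
        PySem.Dict.keys_modify h xr 0 (· + 1)]
      have hnn := pvF_nonneg rest (PySem.Int.bxor xr x)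
      by_cases hx : x = xr
      · subst hx
        rw [if_pos (PySem.Int.bxor_self x)]
        apply iff_of_true
        · exact Or.inl ((PySem.Dict.mem_keys_insert _ _ _ _).mpr (Or.inl rfl))
        · exact Or.inr (by rw [PySem.Int.bxor_self]; exact pvF_pos_zero rest)
      · have hz : ¬ PySem.Int.bxor xr x = 0 := fun hc => hx ((bxor_eq_zero_iff xr x).mp hc).symm
        simp [PySem.Dict.mem_keys_insert, hx, hz]
    intro xr h x
    simp only [pvLoopA]
    rw [ih, hsolve, bxor_swap, pvF_cons]
    have hu := pvF_nonneg rest (PySem.Int.bxor (PySem.Int.bxor xr x) a)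
    have hv : 0 ≤ pvF rest (PySem.Int.bxor xr x)
        - (if PySem.Int.bxor xr x = 0 then 1 else 0) := by
      by_cases hz : PySem.Int.bxor xr x = 0
      · have := pvF_pos_zero rest
        rw [if_pos hz, hz]
        omega
      · have := pvF_nonneg rest (PySem.Int.bxor xr x)
        rw [if_neg hz]
        omega
    rw [show pvF rest (PySem.Int.bxor xr x) + pvF rest (PySem.Int.bxor (PySem.Int.bxor xr x) a)
          - (if PySem.Int.bxor xr x = 0 then 1 else 0)
        = pvF rest (PySem.Int.bxor (PySem.Int.bxor xr x) a)
          + (pvF rest (PySem.Int.bxor xr x) - (if PySem.Int.bxor xr x = 0 then 1 else 0)) by ring]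
    exact or_pos_iff _ _ _ _ hu hv rfl

theorem solveA_keys (l : List Int) : ∀ xr (h : PySem.Dict Int Int) x, x ∈ (pvSolveA l xr h).keys
    ↔ x ∈ h.keys ∨ 0 < pvF l (PySem.Int.bxor xr x) := by
  intro xr h x
  simp only [pvSolveA]
  rw [loopA_keys]
  rw [show (h.modify xr 0 (· + 1)).keys = (h.insert xr (h.getD xr 0 + 1)).keys from
    PySem.Dict.keys_modify h xr 0 (· + 1)]
  have hnn := pvF_nonneg l (PySem.Int.bxor xr x)
  by_cases hx : x = xr
  · subst hx
    rw [if_pos (PySem.Int.bxor_self x)]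
    apply iff_of_true
    · exact Or.inl ((PySem.Dict.mem_keys_insert _ _ _ _).mpr (Or.inl rfl))
    · exact Or.inr (by rw [PySem.Int.bxor_self]; exact pvF_pos_zero l)
  · have hz : ¬ PySem.Int.bxor xr x = 0 := fun hc => hx ((bxor_eq_zero_iff xr x).mp hc).symm
    simp [PySem.Dict.mem_keys_insert, hx, hz]

theorem loopA_nodup (l : List Int) : ∀ xr (h : PySem.Dict Int Int), h.keys.Nodup →
    (pvLoopA l xr h).keys.Nodup := by
  induction l with
  | nil => intro xr h hh; simpa only [pvLoopA] using hh
  | cons a rest ih =>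
    intro xr h hh
    simp only [pvLoopA]
    apply ih
    simp only [pvSolveA]
    apply ih
    rw [show ((h.modify (PySem.Int.bxor xr a) 0 (· + 1))).keys
        = (h.insert (PySem.Int.bxor xr a) (h.getD (PySem.Int.bxor xr a) 0 + 1)).keys from
      PySem.Dict.keys_modify h _ 0 (· + 1)]
    exact PySem.Dict.nodup_keys_insert h _ _ hh

theorem solveA_nodup (l : List Int) : ∀ xr (h : PySem.Dict Int Int), h.keys.Nodup →
    (pvSolveA l xr h).keys.Nodup := by
  intro xr h hh
  simp only [pvSolveA]
  apply loopA_nodup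
  rw [show ((h.modify xr 0 (· + 1))).keys
      = (h.insert xr (h.getD xr 0 + 1)).keys from PySem.Dict.keys_modify h _ 0 (· + 1)]
  exact PySem.Dict.nodup_keys_insert h _ _ hh

-- ===== B-side characterisation =====

theorem foldl_ins_getD (a : Int) (ps : List (Int × Int)) :
    ∀ (d : PySem.Dict Int Int) x,
      (ps.foldl (fun d p => d.insert (PySem.Int.bxor p.1 a) (d.getD (PySem.Int.bxor p.1 a) 0 + p.2)) d).getD x 0
        = d.getD x 0 + ((ps.filter (fun p => PySem.Int.bxor p.1 a = x)).map (·.2)).sum := by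
  induction ps with
  | nil => intro d x; simp
  | cons p ps ih =>
    intro d x
    rw [List.foldl_cons, ih, List.filter_cons]
    by_cases hx : PySem.Int.bxor p.1 a = x
    · rw [if_pos (by simpa using hx), PySem.Dict.getD_insert, if_pos hx.symm, hx]
      simp only [List.map_cons, List.sum_cons]
      ring
    · rw [if_neg (by simpa using hx), PySem.Dict.getD_insert,
        if_neg (fun hc => hx hc.symm)]

theorem sum_filter_items (c : PySem.Dict Int Int) (k : Int) (hnd : c.keys.Nodup) :
    ((c.items.filter (fun p => p.1 = k)).map (·.2)).sum = c.getD k 0 := by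
  rw [PySem.Dict.items_eq_map_keys c hnd 0, List.filter_map, List.map_map]
  by_cases hk : k ∈ c.keys
  · have hcnt : c.keys.count k = 1 := List.count_eq_one_of_mem hnd hk
    have hfe : c.keys.filter ((fun p => decide (p.1 = k)) ∘ fun k' => (k', c.getD k' 0))
        = c.keys.filter (fun k' => k' = k) := by
      apply List.filter_congr
      intro y _
      simp
    rw [hfe, List.filter_eq, hcnt]
    simp
  · have hfe : c.keys.filter ((fun p => decide (p.1 = k)) ∘ fun k' => (k', c.getD k' 0))
        = c.keys.filter (fun k' => k' = k) := by
      apply List.filter_congr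
      intro y _
      simp
    have hcnt : c.keys.count k = 0 := List.count_eq_zero_of_not_mem hk
    rw [hfe, List.filter_eq, hcnt]
    have hcon : c.contains k = false := by
      rw [PySem.Dict.contains_eq_decide_mem_keys]
      simpa using hk
    rw [PySem.Dict.getD_of_not_contains c 0 hcon]
    simp

theorem stepB_getD (c : PySem.Dict Int Int) (a : Int) (hnd : c.keys.Nodup) (x : Int) :
    (pvStepB c a).getD x 0 = c.getD x 0 + c.getD (PySem.Int.bxor x a) 0 := by
  unfold pvStepB
  rw [foldl_ins_getD]
  have hfe : c.items.filter (fun p => PySem.Int.bxor p.1 a = x)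
      = c.items.filter (fun p => p.1 = PySem.Int.bxor x a) := by
    apply List.filter_congr
    intro p _
    have : (PySem.Int.bxor p.1 a = x) ↔ (p.1 = PySem.Int.bxor x a) := by
      rw [bxor_right_eq_iff, PySem.Int.bxor_comm a x]
    simp [this]
  rw [hfe, sum_filter_items c _ hnd]

theorem stepB_mem_keys (c : PySem.Dict Int Int) (a x : Int) :
    x ∈ (pvStepB c a).keys ↔ x ∈ c.keys ∨ PySem.Int.bxor x a ∈ c.keys := by
  unfold pvStepB
  rw [PySem.Dict.keys_foldl_insert_key c.items (fun p => PySem.Int.bxor p.1 a) _ c]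
  rw [PySem.Set.mem_update]
  constructor
  · rintro (hk | hm)
    · exact Or.inl hk
    · rcases List.mem_map.mp hm with ⟨p, hp, hpx⟩
      right
      rw [← hpx, bxor_cancel_right]
      exact List.mem_map_of_mem hp
  · rintro (hk | hm)
    · exact Or.inl hk
    · right
      rcases List.mem_map.mp hm with ⟨p, hp, hpx⟩
      refine List.mem_map.mpr ⟨p, hp, ?_⟩
      rw [hpx, bxor_cancel_right]

theorem stepB_nodup (c : PySem.Dict Int Int) (a : Int) (hnd : c.keys.Nodup) :
    (pvStepB c a).keys.Nodup := by
  exact PySem.Dict.nodup_keys_foldl_insert_key c.items (fun p => PySem.Int.bxor p.1 a) _ c hnd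

def pvInvB (c : PySem.Dict Int Int) (l : List Int) : Prop :=
  (∀ x, c.getD x 0 = pvF l x) ∧ (∀ x, x ∈ c.keys ↔ 0 < pvF l x) ∧ c.keys.Nodup

theorem stepB_inv (c : PySem.Dict Int Int) (a : Int) (l : List Int) (hinv : pvInvB c l) :
    pvInvB (pvStepB c a) (l ++ [a]) := by
  obtain ⟨hg, hm, hnd⟩ := hinv
  refine ⟨?_, ?_, stepB_nodup c a hnd⟩
  · intro x
    rw [stepB_getD c a hnd, pvF_concat, hg, hg]
  · intro x
    rw [stepB_mem_keys, pvF_concat, hm, hm]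
    have h1 := pvF_nonneg l x
    have h2 := pvF_nonneg l (PySem.Int.bxor x a)
    constructor
    · rintro (h | h) <;> omega
    · intro h
      by_cases hb : 0 < pvF l x
      · exact Or.inl hb
      · exact Or.inr (by omega)

theorem foldB_inv (rest : List Int) : ∀ (c : PySem.Dict Int Int) (l : List Int),
    pvInvB c l → pvInvB (rest.foldl pvStepB c) (l ++ rest) := by
  induction rest with
  | nil => intro c l h; simpa using h
  | cons a rest ih =>
    intro c l h
    rw [List.foldl_cons]
    have := ih (pvStepB c a) (l ++ [a]) (stepB_inv c a l h)
    simpa using this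

-- ===== final sum =====

theorem foldl_ansmod (md : Int) (hmd : 0 < md) (vs : List Int) : ∀ c,
    vs.foldl (fun ans v => PySem.Int.mod (ans + PySem.Int.mod (PySem.Int.floordiv (v * (v - 1)) 2) md) md) (c % md)
      = (c + (vs.map (fun v => PySem.Int.mod (PySem.Int.floordiv (v * (v - 1)) 2) md)).sum) % md := by
  induction vs with
  | nil => intro c; simp
  | cons v vs ih =>
    intro c
    rw [List.foldl_cons]
    have h1 : PySem.Int.mod (c % md + PySem.Int.mod (PySem.Int.floordiv (v * (v - 1)) 2) md) md
        = (c + PySem.Int.mod (PySem.Int.floordiv (v * (v - 1)) 2) md) % md := by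
      rw [PySem.Int.mod_eq_emod_of_pos hmd, Int.emod_add_emod]
    rw [h1, ih]
    simp only [List.map_cons, List.sum_cons]
    congr 1
    ring

theorem final_eq (arr : List Int) : xorPair arr = xorPair_alt arr := by
  have hmd : (0 : Int) < 10 ^ 9 + 7 := by norm_num
  -- the A-side dictionary
  set h0 : PySem.Dict Int Int := (PySem.Dict.empty : PySem.Dict Int Int).insert 0 (-1) with hh0
  set hashA : PySem.Dict Int Int := pvSolveA arr 0 h0 with hhashA
  have h0nodup : h0.keys.Nodup :=
    PySem.Dict.nodup_keys_insert _ _ _ PySem.Dict.nodup_keys_empty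
  have hA_nodup : hashA.keys.Nodup := solveA_nodup arr 0 h0 h0nodup
  have hA_getD : ∀ x, hashA.getD x 0 = pvF arr x - (if x = 0 then 1 else 0) := by
    intro x
    rw [hhashA, solveA_getD, zero_bxor, hh0, PySem.Dict.getD_insert, PySem.Dict.getD_empty]
    split_ifs <;> ring
  have hA_mem : ∀ x, x ∈ hashA.keys ↔ 0 < pvF arr x := by
    intro x
    rw [hhashA, solveA_keys, zero_bxor, hh0]
    constructor
    · rintro (hk | hp)
      · rcases (PySem.Dict.mem_keys_insert _ _ _ _).mp hk with h | h
        · rw [h]; exact pvF_pos_zero arr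
        · simp [PySem.Dict.keys_empty] at h
      · exact hp
    · exact fun hp => Or.inr hp
  -- the B-side dictionary
  set c0 : PySem.Dict Int Int := (PySem.Dict.empty : PySem.Dict Int Int).insert 0 1 with hc0
  have hinv0 : pvInvB c0 [] := by
    refine ⟨?_, ?_, PySem.Dict.nodup_keys_insert _ _ _ PySem.Dict.nodup_keys_empty⟩
    · intro x
      rw [hc0, PySem.Dict.getD_insert, PySem.Dict.getD_empty, pvF_nil]
    · intro x
      rw [hc0, PySem.Dict.mem_keys_insert, pvF_nil]
      constructor
      · rintro (h | h)
        · rw [if_pos h]; norm_num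
        · simp [PySem.Dict.keys_empty] at h
      · intro h
        left
        by_contra hne
        rw [if_neg hne] at h
        omega
  have hinv : pvInvB (arr.foldl pvStepB c0) arr := by
    have := foldB_inv arr c0 [] hinv0
    simpa using this
  set cB0 : PySem.Dict Int Int := arr.foldl pvStepB c0 with hcB0
  set cB : PySem.Dict Int Int := cB0.modify 0 0 (· - 1) with hcB
  have hB_nodup : cB.keys.Nodup := by
    rw [hcB, show (cB0.modify 0 0 (· - 1)).keys = (cB0.insert 0 (cB0.getD 0 0 - 1)).keys from
      PySem.Dict.keys_modify cB0 0 0 (· - 1)]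
    exact PySem.Dict.nodup_keys_insert _ _ _ hinv.2.2
  have hB_getD : ∀ x, cB.getD x 0 = pvF arr x - (if x = 0 then 1 else 0) := by
    intro x
    rw [hcB, PySem.Dict.getD_modify, hinv.1 x]
    by_cases hx : x = 0
    · rw [if_pos hx, if_pos hx, hx, hinv.1 0]
    · rw [if_neg hx, if_neg hx]
      ring
  have hB_mem : ∀ x, x ∈ cB.keys ↔ 0 < pvF arr x := by
    intro x
    rw [hcB, show (cB0.modify 0 0 (· - 1)).keys = (cB0.insert 0 (cB0.getD 0 0 - 1)).keys from
      PySem.Dict.keys_modify cB0 0 0 (· - 1), PySem.Dict.mem_keys_insert]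
    constructor
    · rintro (h | h)
      · rw [h]; exact pvF_pos_zero arr
      · exact (hinv.2.1 x).mp h
    · intro h
      exact Or.inr ((hinv.2.1 x).mpr h)
  -- keys permutation and equal per-key values
  have hperm : hashA.keys.Perm cB.keys :=
    (List.perm_ext_iff_of_nodup hA_nodup hB_nodup).mpr (fun x => by rw [hA_mem, hB_mem])
  have hvalA : hashA.values = hashA.keys.map (fun k => hashA.getD k 0) :=
    PySem.Dict.values_eq_map_keys hashA hA_nodup 0
  have hvalB : cB.values = cB.keys.map (fun k => cB.getD k 0) :=
    PySem.Dict.values_eq_map_keys cB hB_nodup 0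
  -- both answers are sums of the same function over a permutation
  show (hashA.values.foldl (fun ans val =>
      PySem.Int.mod (ans + PySem.Int.mod (PySem.Int.floordiv (val * (val - 1)) 2) (10 ^ 9 + 7))
        (10 ^ 9 + 7)) 0)
    = cB.values.foldl (fun ans v =>
      PySem.Int.mod (ans + PySem.Int.mod (PySem.Int.floordiv (v * (v - 1)) 2) (10 ^ 9 + 7))
        (10 ^ 9 + 7)) 0
  have hz : (0 : Int) = 0 % (10 ^ 9 + 7) := (Int.zero_emod _).symm
  rw [show (0 : Int) = 0 % (10 ^ 9 + 7) from hz, foldl_ansmod _ hmd, foldl_ansmod _ hmd]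
  congr 1
  congr 1
  rw [hvalA, hvalB, List.map_map, List.map_map]
  have hfa : hashA.keys.map ((fun v => PySem.Int.mod (PySem.Int.floordiv (v * (v - 1)) 2)
        (10 ^ 9 + 7)) ∘ fun k => hashA.getD k 0)
      = hashA.keys.map (fun k => PySem.Int.mod (PySem.Int.floordiv
          ((pvF arr k - (if k = 0 then 1 else 0)) * ((pvF arr k - (if k = 0 then 1 else 0)) - 1)) 2)
        (10 ^ 9 + 7)) := by
    apply List.map_congr_left
    intro k _
    simp only [Function.comp, hA_getD k]
  have hfb : cB.keys.map ((fun v => PySem.Int.mod (PySem.Int.floordiv (v * (v - 1)) 2)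
        (10 ^ 9 + 7)) ∘ fun k => cB.getD k 0)
      = cB.keys.map (fun k => PySem.Int.mod (PySem.Int.floordiv
          ((pvF arr k - (if k = 0 then 1 else 0)) * ((pvF arr k - (if k = 0 then 1 else 0)) - 1)) 2)
        (10 ^ 9 + 7)) := by
    apply List.map_congr_left
    intro k _
    simp only [Function.comp, hB_getD k]
  rw [hfa, hfb]
  exact (hperm.map _).sum_eq

-- ===== VERDICT (by name: the statement is the Claim_ definition above) =====
theorem xorPair_spec : Claim_equal_xorPair := by
  intro arr _
  unfold Spec_xorPair
  exact final_eq arr
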